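-- pv_equiv track=rewrite | github.com/tveronesi/imdbinfo | imdbinfo/transformers.py | _certificates_to_dict
-- ===== SOURCE A (Python) =====
-- def _certificates_to_dict(result):
--     """
--     given a list of lists, convert it to a dict with country id as key and (country text, rating) as value
--     """
--     # ['CA', 'Canada', '14', ['New Brunswick', 'Nova Scotia', 'Prince Edward Island']]
--     # ['CA', 'Canada', '16', ['Manitoba']]
--     if result is None:
--         return {}
--     res = {}
--     for item in result:
--         cert_id, country_code, country_name, rating_value, rating_reason, regions = item
--         rating = f"{rating_value} " + ", ".join(regions)
--         if country_code not in res: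
--             res[country_code] = [country_name, rating]
--         else:
--             res[country_code][1] += " :: " + rating
--     return res
-- ===== SOURCE B (Python) =====
-- def _certificates_to_dict(result):
--     """
--     given a list of lists, convert it to a dict with country id as key and (country text, rating) as value
--     """
--     if result is None:
--         return {}
--     ratings = {}
--     names = {}
--     for item in result:
--         cert_id, country_code, country_name, rating_value, rating_reason, regions = item
--         rating = f"{rating_value} " + ", ".join(regions)
--         ratings.setdefault(country_code, []).append(rating)
--         if country_code not in names:
--             names[country_code] = country_name
--     return {cc: [name, " :: ".join(ratings[cc])] for cc, name in names.items()}
-- ===== Notes on version B (the rewrite author's own statement) =====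
-- stated objective: alternative
-- what changed: Replaces A's single dict with in-place string concatenation ('res[cc][1] += " :: " + rating') by a collect-then-join scheme: one pass grouping rating strings per country code and recording first-seen names, then a second pass building the output by joining each group once.
import Mathlib
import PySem

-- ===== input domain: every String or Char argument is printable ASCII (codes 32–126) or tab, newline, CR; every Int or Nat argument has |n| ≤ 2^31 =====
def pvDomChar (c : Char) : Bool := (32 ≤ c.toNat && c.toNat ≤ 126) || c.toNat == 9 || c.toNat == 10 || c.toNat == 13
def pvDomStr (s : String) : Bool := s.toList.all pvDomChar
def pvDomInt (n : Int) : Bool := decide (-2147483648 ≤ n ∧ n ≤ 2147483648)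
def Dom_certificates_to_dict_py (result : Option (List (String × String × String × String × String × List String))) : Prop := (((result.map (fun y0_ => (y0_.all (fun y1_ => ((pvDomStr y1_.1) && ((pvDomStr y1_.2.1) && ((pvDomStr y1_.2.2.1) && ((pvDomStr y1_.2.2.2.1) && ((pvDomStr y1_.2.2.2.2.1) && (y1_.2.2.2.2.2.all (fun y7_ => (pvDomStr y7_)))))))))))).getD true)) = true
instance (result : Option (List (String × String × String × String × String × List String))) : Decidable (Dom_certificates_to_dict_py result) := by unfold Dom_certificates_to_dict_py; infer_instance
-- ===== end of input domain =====

-- B replaces A's in-place "+= ' :: ' + rating" accumulation inside one dict by a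
-- collect-then-join decomposition: group rating strings per country code plus a
-- first-seen names dict, then join each group once in a second pass (objective: alternative).

-- ===== PORT A =====
-- one step of A's for-loop: unpack item, build the rating string, then either add a
-- fresh entry or extend index 1 of the existing value in place
def certAStep (res : PySem.Dict String (List String))
    (item : String × String × String × String × String × List String) :
    PySem.Dict String (List String) :=
  let rating := item.2.2.2.1 ++ " " ++ PySem.Str.join ", " item.2.2.2.2.2
  if res.contains item.2.1 = false then
    res.insert item.2.1 [item.2.2.1, rating]
  else
    -- res[country_code][1] += " :: " + rating  (the value list has length 2 here)
    res.modify item.2.1 [] (fun v => v.set 1 (v.getD 1 "" ++ " :: " ++ rating))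

def certificates_to_dict_py (result : Option (List (String × String × String × String × String × List String))) : List (String × List String) :=
  match result with
  | none => []
  | some items => (items.foldl certAStep PySem.Dict.empty).items

-- ===== PORT B =====
-- one step of B's first pass: ratings.setdefault(cc, []).append(rating)
-- (= ratings[cc] = ratings.get(cc, []) + [rating], i.e. Dict.modify) and the
-- first-seen names dict
def certBStep (st : PySem.Dict String (List String) × PySem.Dict String String)
    (item : String × String × String × String × String × List String) :
    PySem.Dict String (List String) × PySem.Dict String String :=
  let rating := item.2.2.2.1 ++ " " ++ PySem.Str.join ", " item.2.2.2.2.2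
  let ratings := st.1.modify item.2.1 [] (fun l => l ++ [rating])
  let names := if st.2.contains item.2.1 then st.2 else st.2.insert item.2.1 item.2.2.1
  (ratings, names)

def certificates_to_dict_py_alt (result : Option (List (String × String × String × String × String × List String))) : List (String × List String) :=
  match result with
  | none => []
  | some items =>
    let st := items.foldl certBStep (PySem.Dict.empty, PySem.Dict.empty)
    -- the dict comprehension over names.items(): its keys are already distinct, so
    -- its items are exactly this map in names' insertion order
    st.2.items.map (fun p => (p.1, [p.2, PySem.Str.join " :: " (st.1.getD p.1 [])]))

-- ===== PRECONDITION & SPEC =====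
def Spec_certificates_to_dict_py (result : Option (List (String × String × String × String × String × List String))) (out : List (String × List String)) : Prop := out = certificates_to_dict_py_alt result
instance (result : Option (List (String × String × String × String × String × List String))) (out : List (String × List String)) : Decidable (Spec_certificates_to_dict_py result out) := by unfold Spec_certificates_to_dict_py; infer_instance

-- ===== CLAIM (what is proved, stated in full; the proofs are below) =====
def Claim_equal_certificates_to_dict_py : Prop := ∀ (result : Option (List (String × String × String × String × String × List String))), Dom_certificates_to_dict_py result → Spec_certificates_to_dict_py result (certificates_to_dict_py result)

-- ===== LEMMAS AND PROOFS =====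

theorem strJoin_singleton (sep r : String) : PySem.Str.join sep [r] = r := by
  rw [← String.toList_inj, PySem.Str.toList_join]
  simp [PySem.Chars.join_singleton]

theorem charsJoin_append_singleton (sep r : List Char) (rs : List (List Char)) (h : rs ≠ []) :
    PySem.Chars.join sep (rs ++ [r]) = PySem.Chars.join sep rs ++ sep ++ r := by
  induction rs with
  | nil => exact absurd rfl h
  | cons x t ih =>
    cases t with
    | nil => simp [PySem.Chars.join_cons_cons, PySem.Chars.join_singleton]
    | cons y t' =>
      have hih := ih (by simp)
      simp only [List.cons_append] at hih ⊢
      rw [PySem.Chars.join_cons_cons, PySem.Chars.join_cons_cons, hih]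
      simp [List.append_assoc]

theorem strJoin_append_singleton (sep r : String) (rs : List String) (h : rs ≠ []) :
    PySem.Str.join sep (rs ++ [r]) = PySem.Str.join sep rs ++ sep ++ r := by
  rw [← String.toList_inj, PySem.Str.toList_join]
  have hne : (List.map String.toList rs) ≠ [] := by simpa using h
  simp [charsJoin_append_singleton sep.toList r.toList _ hne, PySem.Str.toList_join]

/-- the loop invariant tying A's dict to B's (ratings, names) pair -/
def CertInv (d r : PySem.Dict String (List String)) (n : PySem.Dict String String) : Prop :=
  d.items = n.items.map (fun p => (p.1, [p.2, PySem.Str.join " :: " (r.getD p.1 [])]))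
    ∧ (∀ k, r.contains k = n.contains k)
    ∧ (∀ k, r.contains k = true → r.getD k [] ≠ [])
    ∧ n.keys.Nodup

theorem certInv_keys {d r : PySem.Dict String (List String)} {n : PySem.Dict String String}
    (h : CertInv d r n) : d.keys = n.keys := by
  unfold PySem.Dict.keys
  rw [h.1, List.map_map]
  rfl

theorem certInv_step {d r : PySem.Dict String (List String)} {n : PySem.Dict String String}
    (h : CertInv d r n) (item : String × String × String × String × String × List String) :
    CertInv (certAStep d item) (certBStep (r, n) item).1 (certBStep (r, n) item).2 := by
  obtain ⟨hitems, hcont, hne, hnd⟩ := h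
  have hkeys : d.keys = n.keys := certInv_keys ⟨hitems, hcont, hne, hnd⟩
  have hdn : ∀ k, d.contains k = n.contains k := by
    intro k
    rw [PySem.Dict.contains_eq_decide_mem_keys, PySem.Dict.contains_eq_decide_mem_keys, hkeys]
  set cc := item.2.1 with hcc
  set rating := item.2.2.2.1 ++ " " ++ PySem.Str.join ", " item.2.2.2.2.2 with hrating
  by_cases hc : n.contains cc = true
  · -- existing key: A rewrites index 1, B appends to the group
    have hrc : r.contains cc = true := by rw [hcont]; exact hc
    have hdc : d.contains cc = true := by rw [hdn]; exact hc
    have hccmem : cc ∈ n.keys := (PySem.Dict.contains_iff_mem_keys n cc).mp hc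
    have hnitem : (cc, n.getD cc "") ∈ n.items := by
      rw [PySem.Dict.items_eq_map_keys n hnd ""]
      exact List.mem_map.mpr ⟨cc, hccmem, rfl⟩
    have hditem : (cc, [n.getD cc "", PySem.Str.join " :: " (r.getD cc [])]) ∈ d.items := by
      rw [hitems]
      exact List.mem_map.mpr ⟨(cc, n.getD cc ""), hnitem, rfl⟩
    have hdnd : d.keys.Nodup := by rw [hkeys]; exact hnd
    have hdgetD : d.getD cc [] = [n.getD cc "", PySem.Str.join " :: " (r.getD cc [])] :=
      PySem.Dict.getD_of_mem_items d hditem hdnd []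
    have hrsne : r.getD cc [] ≠ [] := hne cc hrc
    unfold certAStep certBStep
    rw [← hcc, ← hrating]
    simp only [hdc, hc, PySem.Dict.modify, Bool.true_eq_false, if_false, if_true]
    refine ⟨?_, ?_, ?_, hnd⟩
    · rw [PySem.Dict.items_insert_of_contains _ _ hdc, hitems, List.map_map]
      apply List.map_congr_left
      intro p hp
      by_cases hpcc : p.1 = cc
      · have hp2 : p.2 = n.getD cc "" := by
          have hmem : (p.1, p.2) ∈ n.items := hp
          have := PySem.Dict.getD_of_mem_items n hmem hnd ""
          rw [hpcc] at this
          exact this.symm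
        simp only [Function.comp, hpcc, beq_self_eq_true, if_true, hp2, hdgetD,
          PySem.Dict.getD_insert]
        have hjoin := strJoin_append_singleton " :: " rating (r.getD cc []) hrsne
        simp [hjoin, List.set, List.getD]
      · simp [PySem.Dict.getD_insert, hpcc]
    · intro k
      rw [PySem.Dict.contains_insert]
      by_cases hk : k = cc
      · simp [hk, hc]
      · simp [beq_eq_false_iff_ne.mpr hk, hcont k]
    · intro k hk
      rw [PySem.Dict.getD_insert]
      by_cases hkcc : k = cc
      · simp [hkcc]
      · rw [if_neg hkcc]
        rw [PySem.Dict.contains_insert] at hk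
        simp only [beq_eq_false_iff_ne.mpr hkcc, Bool.false_or] at hk
        exact hne k hk
  · -- fresh key: A inserts [name, rating], B starts a new group and records the name
    have hc' : n.contains cc = false := by simpa using hc
    have hrc : r.contains cc = false := by rw [hcont]; exact hc'
    have hdc : d.contains cc = false := by rw [hdn]; exact hc'
    have hrgetD : r.getD cc [] = [] := PySem.Dict.getD_of_not_contains r [] hrc
    have hccnmem : cc ∉ n.keys := by
      intro hmem
      rw [(PySem.Dict.contains_iff_mem_keys n cc).mpr hmem] at hc'
      exact absurd hc' (by simp)
    unfold certAStep certBStep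
    rw [← hcc, ← hrating]
    simp only [hdc, hc', PySem.Dict.modify, Bool.false_eq_true, if_false, if_true]
    refine ⟨?_, ?_, ?_, PySem.Dict.nodup_keys_insert n cc item.2.2.1 hnd⟩
    · rw [PySem.Dict.items_insert_of_not_contains _ _ hdc,
        PySem.Dict.items_insert_of_not_contains _ _ hc', List.map_append, hitems]
      congr 1
      · apply List.map_congr_left
        intro p hp
        have hpcc : p.1 ≠ cc := by
          intro hEq
          exact hccnmem (hEq ▸ PySem.Dict.mem_keys_of_mem_items n hp)
        rw [PySem.Dict.getD_insert, if_neg hpcc]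
      · simp [PySem.Dict.getD_insert, hrgetD, strJoin_singleton]
    · intro k
      rw [PySem.Dict.contains_insert, PySem.Dict.contains_insert, hcont k]
    · intro k hk
      rw [PySem.Dict.getD_insert]
      by_cases hkcc : k = cc
      · simp [hkcc, hrgetD]
      · rw [if_neg hkcc]
        rw [PySem.Dict.contains_insert] at hk
        simp only [beq_eq_false_iff_ne.mpr hkcc, Bool.false_or] at hk
        exact hne k hk

theorem certInv_foldl (items : List (String × String × String × String × String × List String))
    (d r : PySem.Dict String (List String)) (n : PySem.Dict String String)
    (h : CertInv d r n) :
    CertInv (items.foldl certAStep d)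
      (items.foldl certBStep (r, n)).1 (items.foldl certBStep (r, n)).2 := by
  induction items generalizing d r n with
  | nil => exact h
  | cons i t ih =>
    simp only [List.foldl_cons]
    exact ih _ _ _ (certInv_step h i)

-- ===== VERDICT (by name: the statement is the Claim_ definition above) =====
theorem certificates_to_dict_py_spec : Claim_equal_certificates_to_dict_py := by
  intro result _
  unfold Spec_certificates_to_dict_py certificates_to_dict_py certificates_to_dict_py_alt
  cases result with
  | none => rfl
  | some items =>
    have hinv : CertInv PySem.Dict.empty PySem.Dict.empty PySem.Dict.empty := by
      refine ⟨rfl, fun k => rfl, ?_, List.nodup_nil⟩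
      intro k hk
      simp [PySem.Dict.contains_empty] at hk
    exact (certInv_foldl items _ _ _ hinv).1
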